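-- pv_equiv track=rewrite | github.com/vedant-kokate/Coding-Conest | CodeChef/Starters 60 Division 2 (Rated)/c.py | f
-- ===== SOURCE A (Python) =====
-- def f(a1,a2):
--     score=0
--     for i in range(len(a1)-1,-1,-1):
--         if a1[i]+score > a2[i]:
--             return -1
--         else:
--             score += a2[i]-a1[i]-score
--     return score
-- ===== SOURCE B (Python) =====
-- def f(a1, a2):
--     if not a1:
--         return 0
--     d = [a2[i] - a1[i] for i in range(len(a1))]
--     if all(d[i] >= d[i + 1] for i in range(len(d) - 1)) and d[-1] >= 0:
--         return d[0]
--     return -1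
-- ===== Notes on version B (the rewrite author's own statement) =====
-- stated objective: simpler
-- what changed: Replaces the right-to-left running-score simulation with a direct forward check: precompute the difference array d and return d[0] iff d is non-increasing and its last entry is non-negative, else -1.
import Mathlib
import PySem

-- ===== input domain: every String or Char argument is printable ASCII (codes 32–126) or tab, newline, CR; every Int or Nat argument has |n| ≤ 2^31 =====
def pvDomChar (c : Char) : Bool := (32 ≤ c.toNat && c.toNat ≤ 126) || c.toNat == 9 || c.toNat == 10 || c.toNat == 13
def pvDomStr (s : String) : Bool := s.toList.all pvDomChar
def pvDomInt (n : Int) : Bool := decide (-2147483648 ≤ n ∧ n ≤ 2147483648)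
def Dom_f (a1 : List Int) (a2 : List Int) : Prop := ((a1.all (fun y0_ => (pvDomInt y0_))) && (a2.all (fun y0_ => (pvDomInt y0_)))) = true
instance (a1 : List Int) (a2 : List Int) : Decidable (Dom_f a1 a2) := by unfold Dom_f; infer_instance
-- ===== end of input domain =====

-- B replaces A's right-to-left running-score simulation by a direct forward
-- monotonicity check on the precomputed difference array (objective: simpler).

-- ===== PORT A =====
-- literal transliteration of A's backward loop with early return;
-- the `| _, _ => -1` arm is Python's IndexError, excluded by Pre_f.
def fLoopA (a1 : List Int) (a2 : List Int) : List Int → Int → Int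
  | [], score => score
  | i :: rest, score =>
    match PySem.List.pyGet? a1 i, PySem.List.pyGet? a2 i with
    | some x, some y =>
      if x + score > y then -1
      else fLoopA a1 a2 rest (score + (y - x - score))
    | _, _ => -1

def f (a1 : List Int) (a2 : List Int) : Int :=
  fLoopA a1 a2 (PySem.List.pyRange ((a1.length : Int) - 1) (-1) (-1)) 0

-- ===== PORT B =====
def f_alt (a1 : List Int) (a2 : List Int) : Int :=
  if a1 = [] then 0
  else
    let d := (PySem.List.pyRange 0 (a1.length) 1).map
      (fun i => PySem.List.pyGetD a2 i 0 - PySem.List.pyGetD a1 i 0)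
    if ((PySem.List.pyRange 0 ((d.length : Int) - 1) 1).all
          (fun i => decide (PySem.List.pyGetD d i 0 ≥ PySem.List.pyGetD d (i + 1) 0)))
        && decide (PySem.List.pyGetD d (-1) 0 ≥ 0)
    then PySem.List.pyGetD d 0 0
    else -1

-- ===== PRECONDITION & SPEC =====
-- Pre_f excludes exactly the inputs where Python A raises IndexError:
-- a1 nonempty but a2 shorter than a1.
def Pre_f (a1 : List Int) (a2 : List Int) : Prop := a1 = [] ∨ a1.length ≤ a2.length
instance (a1 : List Int) (a2 : List Int) : Decidable (Pre_f a1 a2) := by unfold Pre_f; infer_instance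
def pvWitness_f : List Int × List Int := ([1, 2], [3, 4])

def Spec_f (a1 : List Int) (a2 : List Int) (out : Int) : Prop := out = f_alt a1 a2
instance (a1 : List Int) (a2 : List Int) (out : Int) : Decidable (Spec_f a1 a2 out) := by unfold Spec_f; infer_instance

-- ===== CLAIM (what is proved, stated in full; the proofs are below) =====
def Claim_equal_f : Prop := ∀ (a1 : List Int) (a2 : List Int), Dom_f a1 a2 → Pre_f a1 a2 → Spec_f a1 a2 (f a1 a2)

-- ===== LEMMAS AND PROOFS =====

-- the difference array entry d[k]
def dval (a1 : List Int) (a2 : List Int) (k : Nat) : Int := a2.getD k 0 - a1.getD k 0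

theorem pyGet_getD (xs : List Int) (k : Nat) (hk : k < xs.length) :
    PySem.List.pyGet? xs ((k : Nat) : Int) = some (xs.getD k 0) := by
  simp [PySem.List.pyGet?_natCast, List.getElem?_eq_getElem hk]

theorem fLoopA_char (a1 a2 : List Int) (h2 : a1.length ≤ a2.length) :
    ∀ (k : Nat), k < a1.length → ∀ (score : Int),
      fLoopA a1 a2 (PySem.List.pyRange (k : Int) (-1) (-1)) score =
        if score ≤ dval a1 a2 k ∧ (∀ j < k, dval a1 a2 (j + 1) ≤ dval a1 a2 j)
        then dval a1 a2 0 else -1 := by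
  intro k
  induction k with
  | zero =>
    intro hk score
    rw [PySem.List.pyRange_neg_one_cons (by omega : (-1 : Int) < ((0 : Nat) : Int))]
    rw [show ((0 : Nat) : Int) - 1 = (-1 : Int) by norm_num,
        PySem.List.pyRange_neg_one_eq_nil (le_refl (-1 : Int))]
    simp only [fLoopA, pyGet_getD a1 0 hk, pyGet_getD a2 0 (lt_of_lt_of_le hk h2)]
    unfold dval
    split_ifs with h1 h2' h2'
    · exfalso; obtain ⟨hle, -⟩ := h2'; omega
    · rfl
    · ring
    · exact absurd ⟨by omega, fun j hj => absurd hj (by omega)⟩ h2'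
  | succ k ih =>
    intro hk score
    have hk' : k < a1.length := by omega
    rw [PySem.List.pyRange_neg_one_cons (by omega : (-1 : Int) < ((k + 1 : Nat) : Int))]
    rw [show ((k + 1 : Nat) : Int) - 1 = ((k : Nat) : Int) by push_cast; ring]
    simp only [fLoopA, pyGet_getD a1 (k + 1) hk, pyGet_getD a2 (k + 1) (lt_of_lt_of_le hk h2)]
    rw [show score + (a2.getD (k + 1) 0 - a1.getD (k + 1) 0 - score) = dval a1 a2 (k + 1) by
          unfold dval; ring]
    rw [ih hk' (dval a1 a2 (k + 1))]
    have hsplit : (∀ j < k + 1, dval a1 a2 (j + 1) ≤ dval a1 a2 j) ↔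
        ((∀ j < k, dval a1 a2 (j + 1) ≤ dval a1 a2 j) ∧ dval a1 a2 (k + 1) ≤ dval a1 a2 k) := by
      constructor
      · exact fun h => ⟨fun j hj => h j (by omega), h k (by omega)⟩
      · rintro ⟨h, hkk⟩ j hj
        rcases Nat.lt_or_ge j k with hj' | hj'
        · exact h j hj'
        · have : j = k := by omega
          subst this; exact hkk
    split_ifs with h1 h3 h2' h3 h3
    · exfalso; obtain ⟨hs, -⟩ := h3; simp only [dval] at hs; omega
    · rfl
    · rfl
    · exact absurd ⟨by simp only [dval]; omega, hsplit.mpr ⟨h2'.2, h2'.1⟩⟩ h3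
    · exact absurd ⟨(hsplit.mp h3.2).2, (hsplit.mp h3.2).1⟩ h2'
    · rfl

theorem f_char (a1 a2 : List Int) (h1 : a1 ≠ []) (h2 : a1.length ≤ a2.length) :
    f a1 a2 =
      if 0 ≤ dval a1 a2 (a1.length - 1) ∧
          (∀ j < a1.length - 1, dval a1 a2 (j + 1) ≤ dval a1 a2 j)
      then dval a1 a2 0 else -1 := by
  have hn : 0 < a1.length := List.length_pos_iff.mpr h1
  unfold f
  rw [show (a1.length : Int) - 1 = ((a1.length - 1 : Nat) : Int) by omega]
  exact fLoopA_char a1 a2 h2 (a1.length - 1) (by omega) 0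

theorem f_alt_char (a1 a2 : List Int) (h1 : a1 ≠ []) (_h2 : a1.length ≤ a2.length) :
    f_alt a1 a2 =
      if 0 ≤ dval a1 a2 (a1.length - 1) ∧
          (∀ j < a1.length - 1, dval a1 a2 (j + 1) ≤ dval a1 a2 j)
      then dval a1 a2 0 else -1 := by
  have hn : 0 < a1.length := List.length_pos_iff.mpr h1
  set n := a1.length with hn'
  have hgetD : ∀ j, j < n → ((List.range n).map (dval a1 a2)).getD j 0 = dval a1 a2 j := by
    intro j hj
    rw [List.getD_eq_getElem _ _ (by simpa using hj)]
    simp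
  have hidx : ∀ (j : Nat), j < n →
      PySem.List.pyGetD ((List.range n).map (dval a1 a2)) ((j : Nat) : Int) 0 = dval a1 a2 j := by
    intro j hj
    rw [PySem.List.pyGetD_natCast]
    exact hgetD j hj
  have hd : ((PySem.List.pyRange 0 (n : Int) 1).map
      (fun i => PySem.List.pyGetD a2 i 0 - PySem.List.pyGetD a1 i 0)) =
      (List.range n).map (dval a1 a2) := by
    rw [PySem.List.pyRange_one]
    simp [List.map_map, Function.comp, dval]
  have hne : (List.range n).map (dval a1 a2) ≠ [] := by
    simp
    omega
  have hlast : PySem.List.pyGetD ((List.range n).map (dval a1 a2)) (-1) 0 = dval a1 a2 (n - 1) := by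
    rw [PySem.List.pyGetD_neg_one _ _ hne, List.getLast_eq_getElem]
    simp
  have hall : ((PySem.List.pyRange 0 (((((List.range n).map (dval a1 a2)).length : Nat) : Int) - 1) 1).all
        (fun i => decide (PySem.List.pyGetD ((List.range n).map (dval a1 a2)) i 0 ≥
          PySem.List.pyGetD ((List.range n).map (dval a1 a2)) (i + 1) 0))) =
      decide (∀ j < n - 1, dval a1 a2 (j + 1) ≤ dval a1 a2 j) := by
    rw [List.length_map, List.length_range, PySem.List.pyRange_one, Bool.eq_iff_iff]
    simp only [List.all_map, List.all_eq_true, List.mem_range, Function.comp,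
      decide_eq_true_eq, sub_zero]
    constructor
    · intro h j hj
      have hj1 : ((n : Int) - 1).toNat = n - 1 := by omega
      have := h j (by omega)
      rw [show (0 : Int) + (j : Nat) = ((j : Nat) : Int) by ring] at this
      rw [show ((j : Nat) : Int) + 1 = (((j + 1 : Nat)) : Int) by push_cast; ring] at this
      rw [hidx j (by omega), hidx (j + 1) (by omega)] at this
      omega
    · intro h j hj
      have hj' : j < n - 1 := by omega
      rw [show (0 : Int) + (j : Nat) = ((j : Nat) : Int) by ring]
      rw [show ((j : Nat) : Int) + 1 = (((j + 1 : Nat)) : Int) by push_cast; ring]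
      rw [hidx j (by omega), hidx (j + 1) (by omega)]
      exact h j hj'
  unfold f_alt
  rw [if_neg h1]
  simp only [← hn', hd, hlast, hall]
  by_cases hC : (0 ≤ dval a1 a2 (n - 1) ∧ ∀ j < n - 1, dval a1 a2 (j + 1) ≤ dval a1 a2 j)
  · rw [if_pos hC]
    have : PySem.List.pyGetD ((List.range n).map (dval a1 a2)) 0 0 = dval a1 a2 0 := by
      rw [PySem.List.pyGetD_zero]; exact hgetD 0 hn
    rw [if_pos]
    · exact this
    · simp [decide_eq_true_eq]
      exact ⟨hC.2, hC.1⟩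
  · rw [if_neg hC, if_neg]
    simp only [Bool.and_eq_true, decide_eq_true_eq]
    intro ⟨ha, hb⟩
    exact hC ⟨hb, ha⟩

-- ===== VERDICT (by name: the statement is the Claim_ definition above) =====
theorem f_spec : Claim_equal_f := by
  intro a1 a2 _ hpre
  unfold Spec_f
  rcases hpre with h | h
  · subst h; rfl
  · by_cases h1 : a1 = []
    · subst h1; rfl
    · rw [f_char a1 a2 h1 h, f_alt_char a1 a2 h1 h]
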